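-- pv_equiv track=rewrite | github.com/ndhansen/advent_of_code_2024 | src/aoc_2024/day_2.py | is_mostly_safe
-- ===== SOURCE A (Python) =====
-- def is_safe(report: list[int]) -> bool:
--     diffs = []
--     for i in range(len(report) - 1):
--         diffs.append(report[i] - report[i + 1])
--
--     all_increasing = True
--     for i in diffs:
--         if i < 1 or i > 3:
--             all_increasing = False
--     if all_increasing is True:
--         return True
--
--     all_decreasing = True
--     for i in diffs:
--         if i < -3 or i > -1:
--             all_decreasing = False
--     if all_decreasing is True:
--         return True
--     return False
--
-- def is_mostly_safe(report: list[int]) -> bool: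
--     if is_safe(report):
--         return True
--
--     for i in range(len(report)):
--         without = report.copy()
--         del without[i]
--         if is_safe(without) is True:
--             return True
--     return False
-- ===== SOURCE B (Python) =====
-- def is_mostly_safe(report: list[int]) -> bool:
--     # Single pass per direction: find the first violating adjacent pair; only
--     # removing one of its two endpoints can help, so test just those removals.
--     def check(sign: int) -> bool:
--         j = None
--         for k, (a, b) in enumerate(zip(report, report[1:])):
--             if not (1 <= sign * (a - b) <= 3):
--                 j = k
--                 break
--         if j is None:
--             return True
--         for i in (j, j + 1):
--             without = report[:i] + report[i + 1:]
--             if all(1 <= sign * (a - b) <= 3 for a, b in zip(without, without[1:])):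
--                 return True
--         return False
--     return check(1) or check(-1)
-- ===== Notes on version B (the rewrite author's own statement) =====
-- stated objective: faster
-- what changed: Instead of re-checking the whole report after deleting every index (a full safety scan per index), B makes one pass per direction, finds the first violating adjacent pair, and tests only the two removals that can repair it.
import Mathlib
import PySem

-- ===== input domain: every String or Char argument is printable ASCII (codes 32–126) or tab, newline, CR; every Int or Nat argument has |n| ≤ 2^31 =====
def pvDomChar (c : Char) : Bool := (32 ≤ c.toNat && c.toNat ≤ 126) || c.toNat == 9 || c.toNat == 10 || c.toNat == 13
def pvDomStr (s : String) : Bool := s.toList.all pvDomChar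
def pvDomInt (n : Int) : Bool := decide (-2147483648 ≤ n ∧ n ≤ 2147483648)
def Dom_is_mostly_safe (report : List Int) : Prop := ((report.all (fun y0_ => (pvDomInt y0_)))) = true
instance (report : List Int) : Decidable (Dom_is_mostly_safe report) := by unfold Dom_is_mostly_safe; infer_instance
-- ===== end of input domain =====

-- B replaces A's "try deleting every index" scan by one pass per direction that finds the
-- first violating adjacent pair and tests only the removal of its two endpoints (objective: faster).


-- ===== PORT A =====
-- Index loops 'for i in range(…)' are ported by hand over List.range (the indices are the
-- nonnegative ints 0..len-2 resp. 0..len-1, where Python's report[i] is List.getD i; exact there).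
def is_safe (report : List Int) : Bool :=
  let diffs := (List.range (report.length - 1)).foldl
    (fun acc i => acc ++ [report.getD i 0 - report.getD (i + 1) 0]) []
  let all_increasing := diffs.foldl (fun b i => if i < 1 || i > 3 then false else b) true
  if all_increasing then true
  else
    let all_decreasing := diffs.foldl (fun b i => if i < -3 || i > -1 then false else b) true
    if all_decreasing then true else false

-- 'del without[i]' is List.eraseIdx i (i is a nonnegative in-range index); the early 'return True'
-- of the pure loop is the boolean-accumulator fold.
def is_mostly_safe (report : List Int) : Bool :=
  if is_safe report then true
  else (List.range report.length).foldl
    (fun found i => found || is_safe (report.eraseIdx i)) false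

-- ===== PORT B =====
def okPair (sign : Int) (p : Int × Int) : Bool :=
  decide (1 ≤ sign * (p.1 - p.2)) && decide (sign * (p.1 - p.2) ≤ 3)

-- all(1 <= sign*(a-b) <= 3 for a, b in zip(xs, xs[1:]))
def pairsOk (sign : Int) (xs : List Int) : Bool := (xs.zip xs.tail).all (okPair sign)

-- report[:i] + report[i+1:]
def erase1 (report : List Int) (i : Nat) : List Int := report.take i ++ report.drop (i + 1)

-- the first loop (enumerate + break) is findIdx?; the two-candidate loop is the || of its bodies
def checkDir (sign : Int) (report : List Int) : Bool :=
  match (report.zip report.tail).findIdx? (fun p => !okPair sign p) with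
  | none => true
  | some j => pairsOk sign (erase1 report j) || pairsOk sign (erase1 report (j + 1))

def is_mostly_safe_alt (report : List Int) : Bool := checkDir 1 report || checkDir (-1) report

-- ===== PRECONDITION & SPEC =====
def Spec_is_mostly_safe (report : List Int) (out : Bool) : Prop := out = is_mostly_safe_alt report
instance (report : List Int) (out : Bool) : Decidable (Spec_is_mostly_safe report out) := by unfold Spec_is_mostly_safe; infer_instance

-- ===== CLAIM (what is proved, stated in full; the proofs are below) =====
def Claim_equal_is_mostly_safe : Prop := ∀ (report : List Int), Dom_is_mostly_safe report → Spec_is_mostly_safe report (is_mostly_safe report)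

-- ===== LEMMAS AND PROOFS =====

-- the adjacent pairs (l[k], l[k+1]) are all in-direction (proof-side characterisation)
def GoodP (s : Int) (l : List Int) : Prop :=
  ∀ k, (h : k + 1 < l.length) → 1 ≤ s * (l[k] - l[k+1]) ∧ s * (l[k] - l[k+1]) ≤ 3

theorem foldl_flag (p : Int → Bool) (l : List Int) : ∀ (b : Bool),
    l.foldl (fun b i => if p i then false else b) b = (b && l.all fun i => !p i) := by
  induction l with
  | nil => simp
  | cons x xs ih =>
    intro b
    simp only [List.foldl_cons, List.all_cons, ih]
    cases hx : p x <;> simp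

theorem foldl_or (f : Nat → Bool) (l : List Nat) : ∀ (b : Bool),
    l.foldl (fun b i => b || f i) b = (b || l.any f) := by
  induction l with
  | nil => simp
  | cons x xs ih => intro b; simp [List.foldl_cons, ih, Bool.or_assoc]

theorem diffs_eq (l : List Int) :
    (List.range (l.length - 1)).foldl
      (fun acc i => acc ++ [l.getD i 0 - l.getD (i + 1) 0]) [] =
    (l.zip l.tail).map (fun p => p.1 - p.2) := by
  rw [PySem.List.foldl_append_singleton_eq_map]
  apply List.ext_getElem
  · simp only [List.nil_append, List.length_map, List.length_range, List.length_zip,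
      List.length_tail]; omega
  · intro k h1 h2
    have hk : k + 1 < l.length := by simp at h1; omega
    simp only [List.nil_append, List.getElem_map, List.getElem_range, List.getElem_zip,
      List.getElem_tail, List.getD_eq_getElem l 0 (by omega : k < l.length),
      List.getD_eq_getElem l 0 hk]

theorem pairsOk_iff (s : Int) (l : List Int) : pairsOk s l = true ↔ GoodP s l := by
  unfold pairsOk GoodP
  rw [List.all_eq_true]
  constructor
  · intro h k hk
    have hz : k < (l.zip l.tail).length := by
      simp [List.length_zip, List.length_tail]; omega
    have := h _ (List.getElem_mem hz)
    rw [List.getElem_zip, List.getElem_tail] at this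
    simpa [okPair] using this
  · intro h p hp
    obtain ⟨k, hk, rfl⟩ := List.getElem_of_mem hp
    have hk' : k + 1 < l.length := by
      simp [List.length_zip, List.length_tail] at hk; omega
    have := h k hk'
    rw [List.getElem_zip]
    simpa [okPair, List.getElem_tail] using this

theorem is_safe_eq (l : List Int) : is_safe l = (pairsOk 1 l || pairsOk (-1) l) := by
  unfold is_safe pairsOk
  simp only [diffs_eq, foldl_flag, Bool.true_and, List.all_map]
  have e1 : (fun i : Int => !(decide (i < 1) || decide (i > 3))) ∘
      (fun p : Int × Int => p.1 - p.2) = okPair 1 := by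
    funext p; rw [Function.comp_apply, Bool.eq_iff_iff]; simp [okPair]
  have e2 : (fun i : Int => !(decide (i < -3) || decide (i > -1))) ∘
      (fun p : Int × Int => p.1 - p.2) = okPair (-1) := by
    funext p; rw [Function.comp_apply, Bool.eq_iff_iff]; simp [okPair]; omega
  rw [e1, e2]
  cases (l.zip l.tail).all (okPair 1) <;> cases (l.zip l.tail).all (okPair (-1)) <;> simp

theorem is_mostly_safe_iff (l : List Int) :
    is_mostly_safe l = true ↔
      ((GoodP 1 l ∨ GoodP (-1) l) ∨
        ∃ i < l.length, (GoodP 1 (l.eraseIdx i) ∨ GoodP (-1) (l.eraseIdx i))) := by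
  unfold is_mostly_safe
  cases h : is_safe l
  · simp only [Bool.false_eq_true, if_false, foldl_or, Bool.false_or]
    have hs : ¬(GoodP 1 l ∨ GoodP (-1) l) := by
      rw [← pairsOk_iff 1 l, ← pairsOk_iff (-1) l, ← Bool.or_eq_true, ← is_safe_eq, h]
      simp
    simp only [List.any_eq_true, List.mem_range, is_safe_eq, Bool.or_eq_true, pairsOk_iff]
    constructor
    · exact fun h' => Or.inr h'
    · rintro (h' | h')
      · exact absurd h' hs
      · exact h'
  · simp only [if_true, true_iff]
    left
    rw [← pairsOk_iff 1 l, ← pairsOk_iff (-1) l, ← Bool.or_eq_true, ← is_safe_eq]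
    exact h

theorem pair_survives (l : List Int) (i j : Nat) (hj : j + 1 < l.length) (hi : i < l.length)
    (hc : i < j ∨ j + 1 < i) :
    ∃ k, ∃ (hk : k + 1 < (l.eraseIdx i).length),
      (l.eraseIdx i)[k]'(by omega) = l[j]'(by omega) ∧ (l.eraseIdx i)[k+1]'hk = l[j+1]'hj := by
  have hlen : (l.eraseIdx i).length = l.length - 1 := by
    rw [List.length_eraseIdx]; simp [hi]
  rcases hc with hc | hc
  · refine ⟨j - 1, by omega, ?_, ?_⟩
    · rw [List.getElem_eraseIdx, dif_neg (by omega)]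
      congr 1; omega
    · rw [List.getElem_eraseIdx, dif_neg (by omega)]
      congr 1; omega
  · refine ⟨j, by omega, ?_, ?_⟩
    · rw [List.getElem_eraseIdx, dif_pos (by omega)]
    · rw [List.getElem_eraseIdx, dif_pos (by omega)]

theorem erase1_eq (l : List Int) (i : Nat) : erase1 l i = l.eraseIdx i :=
  (List.eraseIdx_eq_take_drop_succ l i).symm

theorem checkDir_iff (s : Int) (l : List Int) :
    checkDir s l = true ↔ (GoodP s l ∨ ∃ i < l.length, GoodP s (l.eraseIdx i)) := by
  unfold checkDir
  cases hf : (l.zip l.tail).findIdx? (fun p => !okPair s p) with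
  | none =>
    rw [List.findIdx?_eq_none_iff] at hf
    simp only [true_iff]
    left
    intro k hk
    have hz : k < (l.zip l.tail).length := by
      simp [List.length_zip, List.length_tail]; omega
    have := hf _ (List.getElem_mem hz)
    rw [List.getElem_zip, List.getElem_tail] at this
    simpa [okPair] using this
  | some j =>
    obtain ⟨hj, hpj, hmin⟩ := List.findIdx?_eq_some_iff_getElem.mp hf
    have hjl : j + 1 < l.length := by
      simp [List.length_zip, List.length_tail] at hj; omega
    have hbad : ¬(1 ≤ s * (l[j]'(by omega) - l[j+1]'hjl) ∧
        s * (l[j]'(by omega) - l[j+1]'hjl) ≤ 3) := by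
      rw [List.getElem_zip, List.getElem_tail] at hpj
      simp [okPair] at hpj
      omega
    simp only [erase1_eq, Bool.or_eq_true, pairsOk_iff]
    constructor
    · rintro (h | h)
      · exact Or.inr ⟨j, by omega, h⟩
      · exact Or.inr ⟨j + 1, by omega, h⟩
    · rintro (hg | ⟨i, hi, hg⟩)
      · exact absurd (hg j hjl) hbad
      · by_cases hij : i = j
        · exact Or.inl (hij ▸ hg)
        by_cases hij1 : i = j + 1
        · exact Or.inr (hij1 ▸ hg)
        exfalso
        obtain ⟨k, hk, e1, e2⟩ := pair_survives l i j hjl hi (by omega)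
        have := hg k hk
        rw [e1, e2] at this
        exact hbad this

-- ===== VERDICT (by name: the statement is the Claim_ definition above) =====
theorem is_mostly_safe_spec : Claim_equal_is_mostly_safe := by
  intro report _
  unfold Spec_is_mostly_safe
  have key : is_mostly_safe report = true ↔ is_mostly_safe_alt report = true := by
    rw [is_mostly_safe_iff]
    simp only [is_mostly_safe_alt, Bool.or_eq_true, checkDir_iff]
    constructor
    · rintro ((h | h) | ⟨i, hi, (h | h)⟩)
      · exact Or.inl (Or.inl h)
      · exact Or.inr (Or.inl h)
      · exact Or.inl (Or.inr ⟨i, hi, h⟩)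
      · exact Or.inr (Or.inr ⟨i, hi, h⟩)
    · rintro ((h | ⟨i, hi, h⟩) | (h | ⟨i, hi, h⟩))
      · exact Or.inl (Or.inl h)
      · exact Or.inr ⟨i, hi, Or.inl h⟩
      · exact Or.inl (Or.inr h)
      · exact Or.inr ⟨i, hi, Or.inr h⟩
  exact Bool.coe_iff_coe.mp key
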